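-- pv_equiv track=rewrite | github.com/AcronMaster/ADA-6-Grafos | grafo1.py | recorrido_con_repeticion
-- ===== SOURCE A (Python) =====
-- def recorrido_con_repeticion(grafo, nodo_inicial, total_nodos=7):
--     recorrido = []
--     visitados = set()
--
--     def dfs(nodo):
--         # Detenerse si se han visitado suficientes nodos
--         if len(visitados) >= total_nodos:
--             return
--         recorrido.append(nodo)
--         visitados.add(nodo)
--
--         for vecino in grafo.get(nodo, []):
--             if vecino not in visitados:
--                 dfs(vecino)
--
--     dfs(nodo_inicial)
--     return recorrido
-- ===== SOURCE B (Python) =====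
-- def recorrido_con_repeticion(grafo, nodo_inicial, total_nodos=7):
--     # Iterative DFS with an explicit stack instead of recursion.
--     recorrido = []
--     visitados = set()
--     stack = [nodo_inicial]
--     while stack:
--         nodo = stack.pop()
--         if nodo in visitados:
--             continue
--         if len(visitados) >= total_nodos:
--             break
--         recorrido.append(nodo)
--         visitados.add(nodo)
--         stack.extend(reversed(grafo.get(nodo, [])))
--     return recorrido
-- ===== Notes on version B (the rewrite author's own statement) =====
-- stated objective: alternative
-- what changed: The nested recursive dfs closure mutating outer lists is replaced by an iterative worklist DFS: an explicit stack, pop-and-skip-visited, break on the length cutoff, and neighbours pushed in reversed order.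
import Mathlib
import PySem

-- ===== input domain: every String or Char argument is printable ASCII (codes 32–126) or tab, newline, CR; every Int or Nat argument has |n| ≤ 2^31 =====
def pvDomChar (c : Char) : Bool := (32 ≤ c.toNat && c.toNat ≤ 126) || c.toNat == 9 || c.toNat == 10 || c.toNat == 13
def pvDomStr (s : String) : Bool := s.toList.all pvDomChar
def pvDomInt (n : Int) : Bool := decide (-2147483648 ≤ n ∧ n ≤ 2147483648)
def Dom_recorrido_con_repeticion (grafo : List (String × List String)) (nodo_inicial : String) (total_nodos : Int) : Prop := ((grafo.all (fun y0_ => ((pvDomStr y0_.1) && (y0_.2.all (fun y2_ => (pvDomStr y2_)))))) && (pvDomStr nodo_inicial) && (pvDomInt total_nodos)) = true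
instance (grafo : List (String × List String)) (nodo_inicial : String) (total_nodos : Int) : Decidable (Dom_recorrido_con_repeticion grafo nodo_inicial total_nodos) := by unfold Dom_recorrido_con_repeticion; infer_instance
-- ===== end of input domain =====

-- B changes the decomposition only: iterative explicit-stack DFS instead of A's recursive closure; same values everywhere.

-- Shared vocabulary of both ports: the adjacency lookup `grafo.get(nodo, [])`
-- and a termination measure (nodes of the finite universe not yet visited).
-- `pvRemaining` and the proof arguments are termination artifacts only; they do not affect values.
def pvAdj (grafo : List (String × List String)) (n : String) : List String :=
  (PySem.Dict.mk grafo).getD n []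

def pvUniv (grafo : List (String × List String)) (nodo_inicial : String) : List String :=
  nodo_inicial :: grafo.flatMap (fun p => p.2)

def pvRemaining (univ vis : List String) : Nat :=
  ((univ.dedup).filter (fun x => decide (x ∉ vis))).length

-- termination facts the ports cite by name in their decreasing_by blocks
theorem pvRemaining_lt (univ vis : List String) (n : String) (hn : n ∈ univ) (hnv : n ∉ vis) :
    pvRemaining univ (n :: vis) < pvRemaining univ vis := by
  unfold pvRemaining
  have hsub : ((univ.dedup).filter (fun x => decide (x ∉ n :: vis))).Sublist
      ((univ.dedup).filter (fun x => decide (x ∉ vis))) := by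
    apply List.monotone_filter_right
    intro a hpa
    simp only [decide_eq_true_eq, List.mem_cons, not_or] at hpa ⊢
    exact hpa.2
  rcases lt_or_eq_of_le hsub.length_le with hlt | heq
  · exact hlt
  · exfalso
    have heql := hsub.eq_of_length heq
    have hmem : n ∈ (univ.dedup).filter (fun x => decide (x ∉ vis)) := by
      simp [List.mem_filter, List.mem_dedup, hn, hnv]
    rw [← heql] at hmem
    simp [List.mem_filter] at hmem

theorem pvRemaining_mono (univ vis vis' : List String) (h : vis ⊆ vis') :
    pvRemaining univ vis' ≤ pvRemaining univ vis := by
  unfold pvRemaining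
  apply List.Sublist.length_le
  apply List.monotone_filter_right
  intro a hpa
  simp only [decide_eq_true_eq] at hpa ⊢
  exact fun hmem => hpa (h hmem)

-- every neighbour returned by `grafo.get` lies in the universe (cited by the ports)
theorem pvAdj_mem_univ (grafo : List (String × List String)) (ni n x : String)
    (hx : x ∈ pvAdj grafo n) : x ∈ pvUniv grafo ni := by
  apply List.mem_cons_of_mem
  unfold pvAdj at hx
  induction grafo with
  | nil =>
    rw [show PySem.Dict.mk ([] : List (String × List String)) = PySem.Dict.empty from rfl,
      PySem.Dict.getD_empty] at hx
    simp at hx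
  | cons p rest ih =>
    rw [PySem.Dict.getD_eq_get?_getD, PySem.Dict.get?_mk_cons] at hx
    cases h : (p.1 == n) with
    | true =>
      simp only [h, if_pos] at hx
      simp only [Option.getD_some] at hx
      exact List.mem_flatMap.mpr ⟨p, List.mem_cons_self .., hx⟩
    | false =>
      simp only [h, Bool.false_eq_true, if_neg, not_false_iff] at hx
      rw [← PySem.Dict.getD_eq_get?_getD] at hx
      have := ih hx
      simp only [List.flatMap_cons, List.mem_append]
      exact Or.inr this

-- ===== PORT A =====
-- A's nested closure `dfs` mutates the outer lists `recorrido`/`visitados`;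
-- the port threads that state explicitly: state = (recorrido, visitados).
-- `visitados` (a Python set) is kept as a list of distinct elements (cons only under nodo ∉ vis),
-- so `.length` is exactly `len(visitados)`.  The hypothesis arguments (hadj, hn, hnv)
-- and the returned subtype property (`vis ⊆ out.2`) serve only for termination.
mutual
def pvDfsA (grafo : List (String × List String)) (univ : List String) (total : Int)
    (nodo : String) (recd vis : List String)
    (hadj : ∀ m x, x ∈ pvAdj grafo m → x ∈ univ) (hn : nodo ∈ univ) (hnv : nodo ∉ vis) :
    {p : List String × List String // vis ⊆ p.2} :=
  -- if len(visitados) >= total_nodos: return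
  if (vis.length : Int) ≥ total then ⟨(recd, vis), fun _ h => h⟩
  else
    -- recorrido.append(nodo); visitados.add(nodo); for vecino in grafo.get(nodo, []): ...
    let o := pvDfsListA grafo univ total (pvAdj grafo nodo) (recd ++ [nodo]) (nodo :: vis)
      hadj (fun x hx => hadj nodo x hx)
    ⟨o.val, fun x hx => o.property (List.mem_cons_of_mem _ hx)⟩
termination_by (pvRemaining univ vis, 0)
decreasing_by
  exact Prod.Lex.left _ _ (pvRemaining_lt univ vis nodo hn hnv)

def pvDfsListA (grafo : List (String × List String)) (univ : List String) (total : Int)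
    (ns : List String) (recd vis : List String)
    (hadj : ∀ m x, x ∈ pvAdj grafo m → x ∈ univ) (hns : ∀ x ∈ ns, x ∈ univ) :
    {p : List String × List String // vis ⊆ p.2} :=
  match ns with
  | [] => ⟨(recd, vis), fun _ h => h⟩
  | v :: rest =>
    -- if vecino not in visitados: dfs(vecino)
    if hv : v ∈ vis then
      pvDfsListA grafo univ total rest recd vis hadj
        (fun x hx => hns x (List.mem_cons_of_mem _ hx))
    else
      let o1 := pvDfsA grafo univ total v recd vis hadj (hns v (List.mem_cons_self ..)) hv
      let o2 := pvDfsListA grafo univ total rest o1.val.1 o1.val.2 hadj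
        (fun x hx => hns x (List.mem_cons_of_mem _ hx))
      ⟨o2.val, fun x hx => o2.property (o1.property hx)⟩
termination_by (pvRemaining univ vis, ns.length + 1)
decreasing_by
  · exact Prod.Lex.right _ (by simp)
  · exact Prod.Lex.right _ (by simp)
  · rcases lt_or_eq_of_le (pvRemaining_mono univ vis o1.val.2
        (fun x hx => o1.property hx)) with hlt | heq
    · exact Prod.Lex.left _ _ hlt
    · rw [heq]; exact Prod.Lex.right _ (by simp)
end

def recorrido_con_repeticion (grafo : List (String × List String)) (nodo_inicial : String) (total_nodos : Int) : List String :=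
  (pvDfsA grafo (pvUniv grafo nodo_inicial) total_nodos nodo_inicial [] []
    (fun m x hx => pvAdj_mem_univ grafo nodo_inicial m x hx)
    (List.mem_cons_self ..) (List.not_mem_nil)).val.1

-- ===== PORT B =====
-- Source B's worklist loop.  The Lean stack keeps the TOP at the HEAD (Python's list
-- keeps it at the end), so Python's `stack.extend(reversed(vecinos))` is
-- `pvAdj grafo n ++ rest` here.  Hypothesis arguments are termination artifacts only.
def pvLoopB (grafo : List (String × List String)) (univ : List String) (total : Int)
    (stack : List String) (recd vis : List String)
    (hadj : ∀ m x, x ∈ pvAdj grafo m → x ∈ univ) (hs : ∀ x ∈ stack, x ∈ univ) : List String :=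
  match stack with
  | [] => recd
  | n :: rest =>
    if hv : n ∈ vis then
      pvLoopB grafo univ total rest recd vis hadj
        (fun x hx => hs x (List.mem_cons_of_mem _ hx))
    else if (vis.length : Int) ≥ total then recd
    else
      pvLoopB grafo univ total (pvAdj grafo n ++ rest) (recd ++ [n]) (n :: vis) hadj
        (fun x hx => (List.mem_append.mp hx).elim
          (fun h => hadj n x h)
          (fun h => hs x (List.mem_cons_of_mem _ h)))
termination_by (pvRemaining univ vis, stack.length)
decreasing_by
  · exact Prod.Lex.right _ (by simp)
  · exact Prod.Lex.left _ _ (pvRemaining_lt univ vis n (hs n (List.mem_cons_self ..)) hv)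

def recorrido_con_repeticion_alt (grafo : List (String × List String)) (nodo_inicial : String) (total_nodos : Int) : List String :=
  pvLoopB grafo (pvUniv grafo nodo_inicial) total_nodos [nodo_inicial] [] []
    (fun m x hx => pvAdj_mem_univ grafo nodo_inicial m x hx)
    (fun x hx => by simp at hx; subst hx; exact List.mem_cons_self ..)

-- ===== PRECONDITION & SPEC =====
def Spec_recorrido_con_repeticion (grafo : List (String × List String)) (nodo_inicial : String) (total_nodos : Int) (out : List String) : Prop := out = recorrido_con_repeticion_alt grafo nodo_inicial total_nodos
instance (grafo : List (String × List String)) (nodo_inicial : String) (total_nodos : Int) (out : List String) : Decidable (Spec_recorrido_con_repeticion grafo nodo_inicial total_nodos out) := by unfold Spec_recorrido_con_repeticion; infer_instance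

-- ===== CLAIM (what is proved, stated in full; the proofs are below) =====
def Claim_equal_recorrido_con_repeticion : Prop := ∀ (grafo : List (String × List String)) (nodo_inicial : String) (total_nodos : Int), Dom_recorrido_con_repeticion grafo nodo_inicial total_nodos → Spec_recorrido_con_repeticion grafo nodo_inicial total_nodos (recorrido_con_repeticion grafo nodo_inicial total_nodos)

-- ===== LEMMAS AND PROOFS =====

-- once the cutoff has been reached, the loop never appends again
theorem pvLoopB_cutoff (grafo : List (String × List String)) (univ : List String) (total : Int)
    (stack recd vis : List String) (hadj : ∀ m x, x ∈ pvAdj grafo m → x ∈ univ)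
    (hs : ∀ x ∈ stack, x ∈ univ)
    (hcut : (vis.length : Int) ≥ total) :
    pvLoopB grafo univ total stack recd vis hadj hs = recd := by
  induction stack with
  | nil => rw [pvLoopB]
  | cons n rest ih =>
    rw [pvLoopB]
    split_ifs with h1
    · exact ih _
    · rfl

-- congruence helpers: the hypothesis arguments are proof-irrelevant, so the ports
-- depend on their list arguments only
theorem pvDfsListA_val_congr (grafo : List (String × List String)) (univ : List String)
    (total : Int) (ns : List String) (recd recd' vis vis' : List String) (hadj)
    (hns : ∀ x ∈ ns, x ∈ univ) (hns' : ∀ x ∈ ns, x ∈ univ)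
    (h1 : recd = recd') (h2 : vis = vis') :
    (pvDfsListA grafo univ total ns recd vis hadj hns).val
      = (pvDfsListA grafo univ total ns recd' vis' hadj hns').val := by
  subst h1; subst h2; rfl

theorem pvLoopB_congr (grafo : List (String × List String)) (univ : List String)
    (total : Int) (stack stack' recd recd' vis vis' : List String) (hadj)
    (hs : ∀ x ∈ stack, x ∈ univ) (hs' : ∀ x ∈ stack', x ∈ univ)
    (h0 : stack = stack') (h1 : recd = recd') (h2 : vis = vis') :
    pvLoopB grafo univ total stack recd vis hadj hs
      = pvLoopB grafo univ total stack' recd' vis' hadj hs' := by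
  subst h0; subst h1; subst h2; rfl

-- once the cutoff has been reached, A's dfs returns immediately
theorem pvDfsA_cutoff (grafo : List (String × List String)) (univ : List String) (total : Int)
    (nodo : String) (recd vis : List String) (hadj) (hn) (hnv)
    (hcut : (vis.length : Int) ≥ total) :
    (pvDfsA grafo univ total nodo recd vis hadj hn hnv).val = (recd, vis) := by
  rw [pvDfsA, if_pos hcut]

-- once the cutoff has been reached, the recursive walker is inert too
theorem pvDfsListA_cutoff (grafo : List (String × List String)) (univ : List String) (total : Int)
    (ns recd vis : List String) (hadj : ∀ m x, x ∈ pvAdj grafo m → x ∈ univ)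
    (hns : ∀ x ∈ ns, x ∈ univ)
    (hcut : (vis.length : Int) ≥ total) :
    (pvDfsListA grafo univ total ns recd vis hadj hns).val = (recd, vis) := by
  induction ns with
  | nil => rw [pvDfsListA]
  | cons v rest ih =>
    rw [pvDfsListA]
    split_ifs with hv
    · exact ih _
    · have h1 := pvDfsA_cutoff grafo univ total v recd vis hadj
        (hns v (List.mem_cons_self ..)) hv hcut
      refine Eq.trans (pvDfsListA_val_congr grafo univ total rest _ recd _ vis hadj _
        (fun x hx => hns x (List.mem_cons_of_mem _ hx))
        (congrArg Prod.fst h1) (congrArg Prod.snd h1)) (ih _)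

-- the bridge: draining `ns` from the stack is exactly running A's recursive walker on `ns`
theorem pvLoopB_eq_dfsList (grafo : List (String × List String)) (univ : List String) (total : Int)
    (ns rest recd vis : List String)
    (hadj : ∀ m x, x ∈ pvAdj grafo m → x ∈ univ)
    (hns : ∀ x ∈ ns, x ∈ univ) (hall : ∀ x ∈ ns ++ rest, x ∈ univ)
    (hrest : ∀ x ∈ rest, x ∈ univ) :
    pvLoopB grafo univ total (ns ++ rest) recd vis hadj hall =
      pvLoopB grafo univ total rest
        (pvDfsListA grafo univ total ns recd vis hadj hns).val.1
        (pvDfsListA grafo univ total ns recd vis hadj hns).val.2 hadj hrest := by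
  match ns with
  | [] =>
    rw [pvDfsListA]
    exact pvLoopB_congr grafo univ total _ rest recd _ vis _ hadj hall hrest
      (List.nil_append rest) rfl rfl
  | v :: ns' =>
    show pvLoopB grafo univ total (v :: (ns' ++ rest)) recd vis hadj hall = _
    rw [pvLoopB, pvDfsListA]
    split_ifs with hv hcut
    · -- v already visited: both sides skip it
      exact pvLoopB_eq_dfsList grafo univ total ns' rest recd vis hadj
        (fun x hx => hns x (List.mem_cons_of_mem _ hx))
        (fun x hx => hall x (List.mem_cons_of_mem _ hx)) hrest
    · -- cutoff reached: both sides are inert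
      have hX : (pvDfsListA grafo univ total ns'
          (pvDfsA grafo univ total v recd vis hadj (hns v (List.mem_cons_self ..)) hv).val.1
          (pvDfsA grafo univ total v recd vis hadj (hns v (List.mem_cons_self ..)) hv).val.2
          hadj (fun x hx => hns x (List.mem_cons_of_mem _ hx))).val = (recd, vis) := by
        have h1 := pvDfsA_cutoff grafo univ total v recd vis hadj
          (hns v (List.mem_cons_self ..)) hv hcut
        refine Eq.trans (pvDfsListA_val_congr grafo univ total ns' _ recd _ vis hadj _
          (fun x hx => hns x (List.mem_cons_of_mem _ hx))
          (congrArg Prod.fst h1) (congrArg Prod.snd h1)) ?_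
        exact pvDfsListA_cutoff grafo univ total ns' recd vis hadj _ hcut
      refine Eq.trans ?_ (pvLoopB_congr grafo univ total rest rest recd _ vis _ hadj hrest hrest
        rfl (congrArg Prod.fst hX).symm (congrArg Prod.snd hX).symm)
      exact (pvLoopB_cutoff grafo univ total rest recd vis hadj hrest hcut).symm
    · -- fresh node, below the cutoff: process it on both sides
      have hvu : v ∈ univ := hns v (List.mem_cons_self ..)
      have hadjv : ∀ x ∈ pvAdj grafo v, x ∈ univ := fun x hx => hadj v x hx
      have hall1 : ∀ x ∈ pvAdj grafo v ++ (ns' ++ rest), x ∈ univ := by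
        intro x hx
        rcases List.mem_append.mp hx with h | h
        · exact hadj v x h
        · exact hall x (List.mem_cons_of_mem _ h)
      have hrest1 : ∀ x ∈ ns' ++ rest, x ∈ univ := fun x hx => hall x (List.mem_cons_of_mem _ hx)
      have hns' : ∀ x ∈ ns', x ∈ univ := fun x hx => hns x (List.mem_cons_of_mem _ hx)
      have e1 := pvLoopB_eq_dfsList grafo univ total (pvAdj grafo v) (ns' ++ rest)
        (recd ++ [v]) (v :: vis) hadj hadjv hall1 hrest1
      have e2 := pvLoopB_eq_dfsList grafo univ total ns' rest
        (pvDfsListA grafo univ total (pvAdj grafo v) (recd ++ [v]) (v :: vis) hadj hadjv).val.1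
        (pvDfsListA grafo univ total (pvAdj grafo v) (recd ++ [v]) (v :: vis) hadj hadjv).val.2
        hadj hns' hrest1 hrest
      have hA : (pvDfsA grafo univ total v recd vis hadj (hns v (List.mem_cons_self ..)) hv).val
          = (pvDfsListA grafo univ total (pvAdj grafo v) (recd ++ [v]) (v :: vis)
              hadj hadjv).val := by
        rw [pvDfsA, if_neg hcut]
      have hW : (pvDfsListA grafo univ total ns'
            (pvDfsListA grafo univ total (pvAdj grafo v) (recd ++ [v]) (v :: vis) hadj hadjv).val.1
            (pvDfsListA grafo univ total (pvAdj grafo v) (recd ++ [v]) (v :: vis) hadj hadjv).val.2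
            hadj hns').val
          = (pvDfsListA grafo univ total ns'
            (pvDfsA grafo univ total v recd vis hadj (hns v (List.mem_cons_self ..)) hv).val.1
            (pvDfsA grafo univ total v recd vis hadj (hns v (List.mem_cons_self ..)) hv).val.2
            hadj (fun x hx => hns x (List.mem_cons_of_mem _ hx))).val :=
        pvDfsListA_val_congr grafo univ total ns' _ _ _ _ hadj hns' _
          (congrArg Prod.fst hA.symm) (congrArg Prod.snd hA.symm)
      refine Eq.trans e1 (Eq.trans e2 ?_)
      exact pvLoopB_congr grafo univ total rest rest _ _ _ _ hadj hrest hrest rfl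
        (congrArg Prod.fst hW) (congrArg Prod.snd hW)
termination_by (pvRemaining univ vis, ns.length)
decreasing_by
  · exact Prod.Lex.right _ (by simp)
  · exact Prod.Lex.left _ _ (pvRemaining_lt univ vis v hvu hv)
  · have hsub := (pvDfsListA grafo univ total (pvAdj grafo v) (recd ++ [v]) (v :: vis)
      hadj hadjv).property
    have h1 : pvRemaining univ (pvDfsListA grafo univ total (pvAdj grafo v) (recd ++ [v])
        (v :: vis) hadj hadjv).val.2 ≤ pvRemaining univ (v :: vis) :=
      pvRemaining_mono univ _ _ hsub
    have h2 : pvRemaining univ (v :: vis) < pvRemaining univ vis :=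
      pvRemaining_lt univ vis v hvu hv
    exact Prod.Lex.left _ _ (by omega)

-- ===== VERDICT (by name: the statement is the Claim_ definition above) =====
theorem recorrido_con_repeticion_spec : Claim_equal_recorrido_con_repeticion := by
  intro grafo ni total _
  unfold Spec_recorrido_con_repeticion recorrido_con_repeticion recorrido_con_repeticion_alt
  rw [pvLoopB, pvDfsA]
  split_ifs with h0 hmem hmem'
  · exact absurd hmem (List.not_mem_nil)
  · rfl
  · exact absurd hmem' (List.not_mem_nil)
  · have e := pvLoopB_eq_dfsList grafo (pvUniv grafo ni) total (pvAdj grafo ni) []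
      ([] ++ [ni]) [ni]
      (fun m x hx => pvAdj_mem_univ grafo ni m x hx)
      (fun x hx => pvAdj_mem_univ grafo ni ni x hx)
      (by intro x hx; simp at hx; exact pvAdj_mem_univ grafo ni ni x hx)
      (by intro x hx; simp at hx)
    rw [pvLoopB] at e
    exact e.symm
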